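-- pv_equiv track=rewrite | github.com/IlyaAndr/WarsawGTFS | scripts/parser.py | tramColor
-- ===== SOURCE A (Python) =====
-- def tramColor(stoplist):
--     "Returns a colour for a tram route."
--     if [x for x in ["701105", "701106", "701307", "701308", "701607", "701608"] if x in stoplist]:
--         return("C90000,FFFFFF") #Marszałkowska
--     elif [x for x in ["700207", "700208", "701309", "701310", "700303", "700304"] if x in stoplist]:
--         return("FFA200,000000") #Al. Jerozolimskie
--     elif [x for x in ["700209", "700210", "708509", "708510", "708903", "708904"] if x in stoplist]:
--         return("3D3DAE,FFFFFF") #Al. Jana Pawła II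
--     elif [x for x in ["708505", "708506", "500203", "500204"] if x in stoplist]:
--         return("AAFE00,000000") #Al. Solidarności
--     else:
--         return("800080,FFFFFF") #Neither of above
-- ===== SOURCE B (Python) =====
-- _MARKERS = [
--     ["701105", "701106", "701307", "701308", "701607", "701608"],  # Marszalkowska
--     ["700207", "700208", "701309", "701310", "700303", "700304"],  # Al. Jerozolimskie
--     ["700209", "700210", "708509", "708510", "708903", "708904"],  # Al. Jana Pawla II
--     ["708505", "708506", "500203", "500204"],                      # Al. Solidarnosci
-- ]
--
-- _COLORS = ["C90000,FFFFFF", "FFA200,000000", "3D3DAE,FFFFFF", "AAFE00,000000",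
--            "800080,FFFFFF"]  # last entry: default colour (no group matched)
--
--
-- def _priority(stop):
--     "Index of the first marker group containing this stop, or len(_MARKERS)."
--     for i, markers in enumerate(_MARKERS):
--         if stop in markers:
--             return i
--     return len(_MARKERS)
--
--
-- def tramColor(stoplist):
--     "Returns a colour for a tram route."
--     return _COLORS[min(map(_priority, stoplist), default=len(_MARKERS))]
-- ===== Notes on version B (the rewrite author's own statement) =====
-- stated objective: alternative
-- what changed: Inverts the traversal: instead of testing each group's marker list against the stoplist in an if-elif cascade, B maps every stop to a numeric group priority (first group containing it), takes the minimum priority over the stoplist, and indexes an ordered colour table with it.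
import Mathlib
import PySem

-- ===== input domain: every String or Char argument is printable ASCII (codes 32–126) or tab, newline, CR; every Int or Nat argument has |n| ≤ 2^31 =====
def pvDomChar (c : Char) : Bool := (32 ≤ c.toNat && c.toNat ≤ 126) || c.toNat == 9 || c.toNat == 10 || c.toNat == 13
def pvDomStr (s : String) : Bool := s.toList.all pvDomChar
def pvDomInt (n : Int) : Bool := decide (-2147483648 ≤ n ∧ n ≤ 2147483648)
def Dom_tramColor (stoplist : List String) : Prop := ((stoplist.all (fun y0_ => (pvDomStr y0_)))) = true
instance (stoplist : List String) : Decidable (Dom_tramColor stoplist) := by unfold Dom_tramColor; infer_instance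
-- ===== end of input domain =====

-- B inverts the traversal (alternative, same cost): each stop is mapped to a numeric group
-- priority, the minimum priority over the stoplist indexes an ordered colour table,
-- instead of A's group-major if-elif cascade of membership filters.


-- ===== PORT A =====
-- Port of A: if-elif chain over list-comprehension filters (truthiness = nonempty filter).
def tramColor (stoplist : List String) : String :=
  if (["701105", "701106", "701307", "701308", "701607", "701608"].filter
        (fun x => stoplist.contains x)) ≠ [] then
    "C90000,FFFFFF"
  else if (["700207", "700208", "701309", "701310", "700303", "700304"].filter
        (fun x => stoplist.contains x)) ≠ [] then
    "FFA200,000000"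
  else if (["700209", "700210", "708509", "708510", "708903", "708904"].filter
        (fun x => stoplist.contains x)) ≠ [] then
    "3D3DAE,FFFFFF"
  else if (["708505", "708506", "500203", "500204"].filter
        (fun x => stoplist.contains x)) ≠ [] then
    "AAFE00,000000"
  else
    "800080,FFFFFF"

-- ===== PORT B =====
def pvMarkers : List (List String) :=
  [ ["701105", "701106", "701307", "701308", "701607", "701608"],
    ["700207", "700208", "701309", "701310", "700303", "700304"],
    ["700209", "700210", "708509", "708510", "708903", "708904"],
    ["708505", "708506", "500203", "500204"] ]

def pvColors : List String :=
  ["C90000,FFFFFF", "FFA200,000000", "3D3DAE,FFFFFF", "AAFE00,000000", "800080,FFFFFF"]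

-- _priority's enumerate loop with early return: counter i tracks the enumerate index,
-- so the fall-through value i at [] equals len(_MARKERS), exactly as in Python.
def findPriority (stop : String) : Nat → List (List String) → Nat
  | i, [] => i
  | i, g :: gs => if g.contains stop then i else findPriority stop (i + 1) gs

def pvPriority (stop : String) : Nat := findPriority stop 0 pvMarkers

-- min(…, default=len(_MARKERS)) ported as a fold starting from the default (exact here:
-- every priority is ≤ len(_MARKERS)); _COLORS[best] via getD (best is always in range).
def tramColor_alt (stoplist : List String) : String :=
  pvColors.getD ((stoplist.map pvPriority).foldl min pvMarkers.length) ""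

-- ===== PRECONDITION & SPEC =====
def Spec_tramColor (stoplist : List String) (out : String) : Prop := out = tramColor_alt stoplist
instance (stoplist : List String) (out : String) : Decidable (Spec_tramColor stoplist out) := by unfold Spec_tramColor; infer_instance

-- ===== CLAIM (what is proved, stated in full; the proofs are below) =====
def Claim_equal_tramColor : Prop := ∀ (stoplist : List String), Dom_tramColor stoplist → Spec_tramColor stoplist (tramColor stoplist)

-- ===== LEMMAS AND PROOFS =====

-- A's branch index, phrased stop-major (l.any) to match B's traversal.
def idxOf (l : List String) : Nat :=
  if l.any (fun s => ["701105", "701106", "701307", "701308", "701607", "701608"].contains s) then 0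
  else if l.any (fun s => ["700207", "700208", "701309", "701310", "700303", "700304"].contains s) then 1
  else if l.any (fun s => ["700209", "700210", "708509", "708510", "708903", "708904"].contains s) then 2
  else if l.any (fun s => ["708505", "708506", "500203", "500204"].contains s) then 3
  else 4

theorem priority_eq (s : String) :
    pvPriority s =
      if (["701105", "701106", "701307", "701308", "701607", "701608"].contains s) then 0
      else if (["700207", "700208", "701309", "701310", "700303", "700304"].contains s) then 1
      else if (["700209", "700210", "708509", "708510", "708903", "708904"].contains s) then 2
      else if (["708505", "708506", "500203", "500204"].contains s) then 3
      else 4 := by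
  simp [pvPriority, pvMarkers, findPriority]

theorem priority_le (s : String) : pvPriority s ≤ 4 := by
  rw [priority_eq]; split_ifs <;> omega

theorem idxOf_le (l : List String) : idxOf l ≤ 4 := by
  unfold idxOf; split_ifs <;> omega

theorem idxOf_cons (s : String) (l : List String) :
    idxOf (s :: l) = min (pvPriority s) (idxOf l) := by
  rw [priority_eq]
  simp only [idxOf, List.any_cons]
  by_cases h1 : (["701105", "701106", "701307", "701308", "701607", "701608"].contains s) = true <;>
  by_cases h2 : (["700207", "700208", "701309", "701310", "700303", "700304"].contains s) = true <;>
  by_cases h3 : (["700209", "700210", "708509", "708510", "708903", "708904"].contains s) = true <;>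
  by_cases h4 : (["708505", "708506", "500203", "500204"].contains s) = true <;>
  simp only [h1, h2, h3, h4, Bool.true_or, Bool.false_or, if_true,
    Bool.not_eq_true] at * <;>
  split_ifs <;> first | omega | simp_all

theorem fold_eq (l : List String) : ∀ b : Nat, b ≤ 4 →
    (l.map pvPriority).foldl min b = min b (idxOf l) := by
  induction l with
  | nil => intro b hb; simp [idxOf]; omega
  | cons s l ih =>
      intro b hb
      have h1 : min b (pvPriority s) ≤ 4 := by have := priority_le s; omega
      simp only [List.map_cons, List.foldl_cons]
      rw [ih _ h1, idxOf_cons]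
      omega

theorem filter_ne_iff (g l : List String) :
    (g.filter (fun x => l.contains x) ≠ []) ↔ l.any (fun s => g.contains s) = true := by
  simp only [ne_eq, List.filter_eq_nil_iff, List.any_eq_true, List.contains_eq_mem,
    decide_eq_true_eq, not_forall]
  constructor
  · rintro ⟨x, hg, hl⟩; exact ⟨x, by simpa using hl, hg⟩
  · rintro ⟨x, hl, hg⟩; exact ⟨x, hg, by simpa using hl⟩

theorem tramColor_eq_idx (l : List String) : tramColor l = pvColors.getD (idxOf l) "" := by
  unfold tramColor idxOf
  simp only [filter_ne_iff]
  split_ifs <;> rfl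

-- ===== VERDICT (by name: the statement is the Claim_ definition above) =====
theorem tramColor_spec : Claim_equal_tramColor := by
  intro stoplist _
  unfold Spec_tramColor tramColor_alt
  have h4 : idxOf stoplist ≤ 4 := idxOf_le stoplist
  rw [fold_eq stoplist pvMarkers.length (by simp [pvMarkers]), tramColor_eq_idx]
  simp only [pvMarkers, List.length_cons, List.length_nil]
  congr 1
  omega
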